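-- pv_equiv track=rewrite | github.com/devSpala/SmartSearch-FSBI | Server/fsbi.py | fractal_decompose
-- ===== SOURCE A (Python) =====
-- from typing import List, Dict, Any, Tuple
--
-- def fractal_decompose(text: str, max_phrase_len: int = 3) -> Dict[int, List[str]]:
--     # Levels:
--     # 1: characters, 2: bigrams, 3: full tokens, 4+: phrase-level up to max_phrase_len
--     text = text.strip().lower()
--     tokens = [t for t in text.split() if t]
--     levels = {}
--     # Level 1: characters of the full text
--     levels.setdefault(1, [])
--     for ch in text:
--         if ch.strip():
--             levels[1].append(ch)
--     # Level 2: bigrams per token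
--     levels.setdefault(2, [])
--     for t in tokens:
--         for i in range(len(t)-1):
--             levels[2].append(t[i:i+2])
--     # Level 3: tokens
--     levels.setdefault(3, []).extend(tokens)
--     # Level >=4: phrases
--     for L in range(2, max_phrase_len+1):
--         lvl = 3 + L - 1
--         levels.setdefault(lvl, [])
--         for i in range(len(tokens)-L+1):
--             levels[lvl].append(" ".join(tokens[i:i+L]))
--     return levels
-- ===== SOURCE B (Python) =====
-- def fractal_decompose(text: str, max_phrase_len: int = 3):
--     t = text.strip().lower()
--     tokens = t.split()
--     levels = {
--         1: [c for c in t if not c.isspace()],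
--         2: [a + b for tok in tokens for a, b in zip(tok, tok[1:])],
--         3: tokens,
--     }
--     # each phrase level is derived from the previous one by zipping with shifted tokens
--     prev = tokens
--     for L in range(2, max_phrase_len + 1):
--         prev = [p + " " + w for p, w in zip(prev, tokens[L - 1:])]
--         levels[L + 2] = prev
--     return levels
-- ===== Notes on version B (the rewrite author's own statement) =====
-- stated objective: alternative
-- what changed: Instead of re-slicing tokens[i:i+L] and re-joining for every phrase of every level, B builds each phrase level incrementally from the previous level by zipping it with the shifted token list (and uses direct comprehensions/zip for the char and bigram levels), writing the pre-computed lists into the dict once.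
import Mathlib
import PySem

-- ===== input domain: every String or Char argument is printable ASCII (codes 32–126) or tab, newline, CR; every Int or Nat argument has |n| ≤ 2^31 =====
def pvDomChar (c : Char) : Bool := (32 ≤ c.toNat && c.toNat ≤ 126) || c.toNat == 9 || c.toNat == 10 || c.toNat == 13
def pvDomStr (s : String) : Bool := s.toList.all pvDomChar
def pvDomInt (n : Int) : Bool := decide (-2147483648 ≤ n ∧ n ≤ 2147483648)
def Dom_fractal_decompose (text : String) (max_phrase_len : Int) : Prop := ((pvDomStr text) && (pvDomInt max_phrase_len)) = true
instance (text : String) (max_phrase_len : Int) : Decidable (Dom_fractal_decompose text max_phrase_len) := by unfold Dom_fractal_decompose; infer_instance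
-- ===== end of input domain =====

-- B builds each phrase level incrementally from the previous one by zipping with shifted tokens instead of re-slicing and re-joining; objective: alternative decomposition.

-- ===== PORT A =====
def fractal_decompose (text : String) (max_phrase_len : Int) : List (Int × List String) :=
  let t := PySem.Str.lower (PySem.Str.strip text)
  let tokens := (PySem.Str.split₀ t).filter (fun tok => tok != "")
  let d : PySem.Dict Int (List String) := PySem.Dict.empty
  -- Level 1: characters of the full text
  let d := d.setdefault 1 []
  let d := t.toList.foldl (fun d ch =>
      if PySem.Str.strip (String.ofList [ch]) != "" then
        d.modify 1 [] (fun ys => ys ++ [String.ofList [ch]]) else d) d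
  -- Level 2: bigrams per token
  let d := d.setdefault 2 []
  let d := tokens.foldl (fun d tok =>
      (PySem.List.pyRange 0 (PySem.Str.len tok - 1) 1).foldl
        (fun d i => d.modify 2 [] (fun ys => ys ++ [PySem.Str.slice tok (some i) (some (i + 2))])) d) d
  -- Level 3: tokens
  let d := d.setdefault 3 []
  let d := d.modify 3 [] (fun ys => ys ++ tokens)
  -- Level >= 4: phrases
  let d := (PySem.List.pyRange 2 (max_phrase_len + 1) 1).foldl (fun d L =>
      let lvl := 3 + L - 1
      let d := d.setdefault lvl []
      (PySem.List.pyRange 0 ((tokens.length : Int) - L + 1) 1).foldl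
        (fun d i => d.modify lvl []
          (fun ys => ys ++ [PySem.Str.join " " (PySem.List.slice tokens (some i) (some (i + L)))])) d) d
  d.items

-- ===== PORT B =====
def fractal_decompose_alt (text : String) (max_phrase_len : Int) : List (Int × List String) :=
  let t := PySem.Str.lower (PySem.Str.strip text)
  let tokens := PySem.Str.split₀ t
  let d : PySem.Dict Int (List String) := PySem.Dict.mk
    [(1, (t.toList.filter (fun c => !PySem.Chars.isspace c)).map (fun c => String.ofList [c])),
     (2, tokens.flatMap (fun tok =>
           (tok.toList.zip tok.toList.tail).map (fun p => String.ofList [p.1, p.2]))),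
     (3, tokens)]
  -- each phrase level is derived from the previous one by zipping with shifted tokens
  let st := (PySem.List.pyRange 2 (max_phrase_len + 1) 1).foldl
      (fun (s : PySem.Dict Int (List String) × List String) L =>
        let prev := (s.2.zip (PySem.List.slice tokens (some (L - 1)) none)).map
          (fun p => p.1 ++ " " ++ p.2)
        (s.1.insert (L + 2) prev, prev))
      (d, tokens)
  st.1.items

-- ===== PRECONDITION & SPEC =====
def Spec_fractal_decompose (text : String) (max_phrase_len : Int) (out : List (Int × List String)) : Prop := out = fractal_decompose_alt text max_phrase_len
instance (text : String) (max_phrase_len : Int) (out : List (Int × List String)) : Decidable (Spec_fractal_decompose text max_phrase_len out) := by unfold Spec_fractal_decompose; infer_instance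

-- ===== CLAIM (what is proved, stated in full; the proofs are below) =====
def Claim_equal_fractal_decompose : Prop := ∀ (text : String) (max_phrase_len : Int), Dom_fractal_decompose text max_phrase_len → Spec_fractal_decompose text max_phrase_len (fractal_decompose text max_phrase_len)

-- ===== LEMMAS AND PROOFS =====

-- the normalized text and its tokens
def pvT (text : String) : String := PySem.Str.lower (PySem.Str.strip text)
def pvToks (text : String) : List String := PySem.Str.split₀ (pvT text)

-- windows of k consecutive tokens, joined with a single space
def pvWin (tokens : List String) (k : Nat) : List String :=
  (List.range (tokens.length + 1 - k)).map
    (fun i => PySem.Str.join " " (List.take k (List.drop i tokens)))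

-- common normal form of both programs' results
def pvBase (text : String) : List (Int × List String) :=
  [(1, ((pvT text).toList.filter (fun c => !PySem.Chars.isspace c)).map (fun c => String.ofList [c])),
   (2, (pvToks text).flatMap (fun tok =>
         (tok.toList.zip tok.toList.tail).map (fun p => String.ofList [p.1, p.2]))),
   (3, pvToks text)]

-- ---- generic dictionary facts about the loops both ports run ----

lemma pvContains_of_fresh {ps : List (Int × List String)} {k : Int}
    (h : ∀ p ∈ ps, p.1 ≠ k) : (PySem.Dict.mk ps).contains k = false := by
  rw [PySem.Dict.contains_mk]
  simp only [List.any_eq_false]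
  intro p hp; simpa using h p hp

lemma pvInsert_fresh {ps : List (Int × List String)} {k : Int} (v : List String)
    (h : ∀ p ∈ ps, p.1 ≠ k) :
    (PySem.Dict.mk ps).insert k v = PySem.Dict.mk (ps ++ [(k, v)]) := by
  apply PySem.Dict.ext
  rw [PySem.Dict.items_insert_of_not_contains _ _ (pvContains_of_fresh h)]

lemma pvSetdefault_snoc {ps : List (Int × List String)} {k : Int} (v : List String)
    (h : ∀ p ∈ ps, p.1 ≠ k) :
    (PySem.Dict.mk ps).setdefault k v = PySem.Dict.mk (ps ++ [(k, v)]) := by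
  rw [PySem.Dict.setdefault_of_not_contains _ _ (pvContains_of_fresh h)]
  exact pvInsert_fresh v h

lemma pvGetD_snoc {ps : List (Int × List String)} {k : Int} (v d0 : List String)
    (h : ∀ p ∈ ps, p.1 ≠ k) :
    (PySem.Dict.mk (ps ++ [(k, v)])).getD k d0 = v := by
  induction ps with
  | nil => simp [PySem.Dict.getD_eq_get?_getD, PySem.Dict.get?_mk_cons]
  | cons p rest ih =>
    obtain ⟨a, b⟩ := p
    have hp : a ≠ k := h (a, b) (by simp)
    have ih' := ih (fun q hq => h q (by simp [hq]))
    simp only [PySem.Dict.getD_eq_get?_getD] at ih' ⊢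
    simp only [List.cons_append, PySem.Dict.get?_mk_cons, beq_iff_eq, if_neg hp]
    exact ih'

lemma pvModify_snoc {ps : List (Int × List String)} {k : Int} (v : List String)
    (f : List String → List String) (h : ∀ p ∈ ps, p.1 ≠ k) :
    (PySem.Dict.mk (ps ++ [(k, v)])).modify k [] f = PySem.Dict.mk (ps ++ [(k, f v)]) := by
  have hc : (PySem.Dict.mk (ps ++ [(k, v)])).contains k = true := by
    rw [PySem.Dict.contains_mk]; simp
  simp only [PySem.Dict.modify, pvGetD_snoc v [] h]
  apply PySem.Dict.ext
  rw [PySem.Dict.items_insert_of_contains _ _ hc]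
  have hit : (PySem.Dict.mk (ps ++ [(k, v)])).items = ps ++ [(k, v)] := rfl
  rw [hit, List.map_append]
  congr 1
  · have : List.map (fun p => if (p.1 == k) = true then (k, f v) else p) ps = List.map id ps :=
      List.map_congr_left (fun p hp => by simp [h p hp])
    rw [this, List.map_id]
  · simp

lemma pvFoldl_chunk_snoc {α : Type} (l : List α) (c : α → List String)
    (k : Int) (ps : List (Int × List String))
    (step : PySem.Dict Int (List String) → α → PySem.Dict Int (List String))
    (hstep : ∀ (v : List String) (x : α), x ∈ l →
      step (PySem.Dict.mk (ps ++ [(k, v)])) x = PySem.Dict.mk (ps ++ [(k, v ++ c x)])) :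
    ∀ v, l.foldl step (PySem.Dict.mk (ps ++ [(k, v)]))
      = PySem.Dict.mk (ps ++ [(k, v ++ l.flatMap c)]) := by
  induction l with
  | nil => simp
  | cons x rest ih =>
    intro v
    rw [List.foldl_cons, hstep v x (by simp)]
    rw [ih (fun w y hy => hstep w y (by simp [hy])) (v ++ c x)]
    simp

-- ---- string facts ----

lemma pvNe_empty_iff (s : String) : (s != "") = !s.toList.isEmpty := by
  by_cases h : s = ""
  · subst h; decide
  · have h2 : s.toList ≠ [] := fun he => h (String.toList_inj.mp (by simpa using he))
    have hb : (s == "") = false := beq_eq_false_iff_ne.mpr h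
    have hi : s.toList.isEmpty = false := by simpa [List.isEmpty_iff] using h2
    simp [bne, hb, hi]

lemma pvStripSingle (c : Char) :
    PySem.Chars.strip [c] = if PySem.Chars.isspace c then [] else [c] := by
  by_cases h : PySem.Chars.isspace c <;>
    simp [PySem.Chars.strip, PySem.Chars.lstrip, PySem.Chars.rstrip, List.dropWhile, h]

-- the per-character test of A is the isspace test of B
lemma pvStripChar (c : Char) :
    (PySem.Str.strip (String.ofList [c]) != "") = !PySem.Chars.isspace c := by
  rw [pvNe_empty_iff, PySem.Str.toList_strip, String.toList_ofList, pvStripSingle]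
  by_cases h : PySem.Chars.isspace c <;> simp [h]

-- words produced by str.split() are never empty
lemma pvSplit₀go_ne (s : List Char) : ∀ (cur : List Char) (acc : List (List Char)),
    (∀ w ∈ acc, w ≠ []) → ∀ w ∈ PySem.Chars.split₀.go s cur acc, w ≠ [] := by
  induction s with
  | nil =>
    intro cur acc hacc w hw
    by_cases hc : cur.isEmpty <;> simp [PySem.Chars.split₀.go, hc] at hw
    · exact hacc w hw
    · rcases hw with hw | hw
      · exact hacc w hw
      · subst hw; simpa [List.isEmpty_iff] using hc
  | cons c rest ih =>
    intro cur acc hacc w hw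
    by_cases hs : PySem.Chars.isspace c
    · by_cases hc : cur.isEmpty
      · rw [PySem.Chars.split₀.go] at hw
        simp only [hs, hc, if_true] at hw
        exact ih [] acc hacc w hw
      · rw [PySem.Chars.split₀.go] at hw
        simp only [hs, hc, if_true] at hw
        refine ih [] _ ?_ w hw
        intro u hu
        rcases List.mem_cons.mp hu with hu | hu
        · subst hu; simpa [List.isEmpty_iff] using hc
        · exact hacc u hu
    · rw [PySem.Chars.split₀.go] at hw
      simp only [hs] at hw
      exact ih (c :: cur) acc hacc w hw

lemma pvFilter_split₀ (t : String) :
    (PySem.Str.split₀ t).filter (fun tok => tok != "") = PySem.Str.split₀ t := by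
  apply List.filter_eq_self.mpr
  intro tok htok
  have hmem : tok.toList ∈ PySem.Chars.split₀ t.toList := by
    rw [← PySem.Str.split₀_map_toList]
    exact List.mem_map_of_mem htok
  have hne : tok.toList ≠ [] :=
    pvSplit₀go_ne t.toList [] [] (by simp) tok.toList hmem
  have : tok ≠ "" := fun he => hne (by simp [he])
  simpa [bne] using beq_eq_false_iff_ne.mpr this

-- ---- window facts ----

lemma pvJoin_snoc (sep : List Char) (parts : List (List Char)) (x : List Char)
    (h : parts ≠ []) :
    PySem.Chars.join sep (parts ++ [x]) = PySem.Chars.join sep parts ++ sep ++ x := by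
  induction parts with
  | nil => exact absurd rfl h
  | cons p rest ih =>
    cases rest with
    | nil => simp [PySem.Chars.join_cons_cons, PySem.Chars.join_singleton]
    | cons q rest' =>
      have ih' := ih (by simp)
      simp only [List.cons_append] at ih' ⊢
      rw [PySem.Chars.join_cons_cons, ih', PySem.Chars.join_cons_cons]
      simp [List.append_assoc]

lemma pvWin_one (tokens : List String) : pvWin tokens 1 = tokens := by
  apply List.ext_getElem
  · simp [pvWin]
  · intro i h1 h2
    simp only [pvWin, List.getElem_map, List.getElem_range]
    have hi : i < tokens.length := by simp [pvWin] at h1; omega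
    rw [List.drop_eq_getElem_cons hi]
    have ht : List.take 1 (tokens[i] :: List.drop (i + 1) tokens) = [tokens[i]] := rfl
    rw [ht]
    apply String.toList_inj.mp
    rw [PySem.Str.toList_join]
    simp [PySem.Chars.join_singleton]

-- B's zip step extends every window by the next token
lemma pvWin_succ (tokens : List String) (k : Nat) (hk : 1 ≤ k) :
    ((pvWin tokens k).zip (tokens.drop k)).map (fun p => p.1 ++ " " ++ p.2)
      = pvWin tokens (k + 1) := by
  apply List.ext_getElem
  · simp [pvWin]; omega
  · intro i h1 h2
    have hlen : i < tokens.length - k := by simp [pvWin] at h1; omega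
    have hik : i + k < tokens.length := by omega
    simp only [List.getElem_map, List.getElem_zip, pvWin, List.getElem_range,
      List.getElem_drop]
    apply String.toList_inj.mp
    simp only [String.toList_append, PySem.Str.toList_join]
    have htake : List.take (k + 1) (List.drop i tokens)
        = List.take k (List.drop i tokens) ++ [tokens[i + k]] := by
      rw [List.take_succ]
      have : (List.drop i tokens)[k]? = some tokens[i + k] := by
        rw [List.getElem?_drop]
        exact List.getElem?_eq_getElem hik
      simp [this]
    have hne : List.map String.toList (List.take k (List.drop i tokens)) ≠ [] := by
      have hlt : (List.take k (List.drop i tokens)).length = k := by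
        rw [List.length_take, List.length_drop]; omega
      intro he
      rw [List.map_eq_nil_iff] at he
      simp [he] at hlt; omega
    rw [htake, List.map_append, List.map_cons, List.map_nil, pvJoin_snoc _ _ _ hne]
    simp [Nat.add_comm k i]

-- A's slice-and-join phrase list for level L is the window list
lemma pvWinList_eq (tokens : List String) (L : Int) (hL : 1 ≤ L) :
    (PySem.List.pyRange 0 ((tokens.length : Int) - L + 1) 1).map
      (fun i => PySem.Str.join " " (PySem.List.slice tokens (some i) (some (i + L))))
    = pvWin tokens L.toNat := by
  set n := tokens.length with hn
  by_cases hk : L.toNat ≤ n + 1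
  · have hb : (n : Int) - L + 1 = ((n + 1 - L.toNat : Nat) : Int) := by omega
    rw [hb, PySem.List.pyRange_zero_natCast, List.map_map]
    unfold pvWin
    apply List.map_congr_left
    intro i _
    simp only [Function.comp]
    have hL2 : ((i : Nat) : Int) + L = ((i : Nat) : Int) + ((L.toNat : Nat) : Int) := by omega
    rw [hL2, PySem.List.slice_natCast_add]
  · have hb : (n : Int) - L + 1 ≤ 0 := by omega
    rw [PySem.List.pyRange_one_eq_nil hb]
    unfold pvWin
    have h0 : n + 1 - L.toNat = 0 := by omega
    rw [← hn, h0]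
    simp

-- A's per-token bigram loop equals B's zip comprehension
lemma pvBigrams (tok : String) :
    (PySem.List.pyRange 0 (PySem.Str.len tok - 1) 1).map
      (fun i => PySem.Str.slice tok (some i) (some (i + 2)))
    = (tok.toList.zip tok.toList.tail).map (fun p => String.ofList [p.1, p.2]) := by
  rcases hn : tok.toList.length with _ | n
  · have h0 : PySem.Str.len tok - 1 = -1 := by rw [PySem.Str.len_eq, hn]; rfl
    rw [h0, PySem.List.pyRange_one_eq_nil (by omega)]
    have : tok.toList = [] := List.length_eq_zero_iff.mp hn
    simp [this]
  · have h0 : PySem.Str.len tok - 1 = ((n : Nat) : Int) := by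
      rw [PySem.Str.len_eq, hn]; push_cast; ring
    rw [h0, PySem.List.pyRange_zero_natCast]
    rw [List.map_map]
    apply List.ext_getElem
    · simp [hn]
    · intro i h1 h2
      have hi1 : i + 1 < tok.toList.length := by simp at h1; omega
      have hi : i < tok.toList.length := by omega
      simp only [List.getElem_map, List.getElem_range, List.getElem_zip, Function.comp]
      apply String.toList_inj.mp
      rw [PySem.Str.toList_slice, PySem.Chars.slice_eq_listSlice]
      have hc : ((i : Nat) : Int) + 2 = ((i : Nat) : Int) + ((2 : Nat) : Int) := by push_cast; ring
      rw [hc, PySem.List.slice_natCast_add]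
      have ht : List.take 2 (List.drop i tok.toList) = [tok.toList[i], tok.toList[i + 1]] := by
        rw [List.drop_eq_getElem_cons hi, List.drop_eq_getElem_cons hi1]
        rfl
      rw [ht]
      simp [List.getElem_tail]

-- ---- the phrase loops, abstracted over the step function ----

lemma pvPhraseFoldA (w : Int → List String)
    (step : PySem.Dict Int (List String) → Int → PySem.Dict Int (List String))
    (m : Int)
    (hstep : ∀ (ps : List (Int × List String)) (L : Int), 2 ≤ L →
      (∀ p ∈ ps, p.1 < L + 2) →
      step (PySem.Dict.mk ps) L = PySem.Dict.mk (ps ++ [(L + 2, w L)])) :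
    ∀ (fuel j : Nat), (m + 1 - ((j : Int) + 2)).toNat ≤ fuel →
    ∀ (ps : List (Int × List String)), (∀ p ∈ ps, p.1 < (j : Int) + 4) →
    (PySem.List.pyRange ((j : Int) + 2) (m + 1) 1).foldl step (PySem.Dict.mk ps)
      = PySem.Dict.mk (ps ++ (PySem.List.pyRange ((j : Int) + 2) (m + 1) 1).map
          (fun L => (L + 2, w L))) := by
  intro fuel
  induction fuel with
  | zero =>
    intro j hf ps _
    have hb : m + 1 ≤ (j : Int) + 2 := by omega
    rw [PySem.List.pyRange_one_eq_nil hb]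
    simp
  | succ fuel ih =>
    intro j hf ps hk
    by_cases h : (j : Int) + 2 < m + 1
    · rw [PySem.List.pyRange_one_cons h, List.foldl_cons, List.map_cons,
        hstep ps ((j : Int) + 2) (by omega) (by intro p hp; have := hk p hp; omega)]
      have hcast : (j : Int) + 2 + 1 = ((j + 1 : Nat) : Int) + 2 := by push_cast; ring
      rw [hcast]
      rw [ih (j + 1) (by omega) (ps ++ [((j : Int) + 2 + 2, w ((j : Int) + 2))])
        (by
          intro p hp
          rcases List.mem_append.mp hp with hp | hp
          · have := hk p hp; push_cast; omega
          · simp at hp; subst hp; simp; omega)]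
      simp [List.append_assoc]
    · have hb : m + 1 ≤ (j : Int) + 2 := by omega
      rw [PySem.List.pyRange_one_eq_nil hb]
      simp

lemma pvPhraseFoldB (w : Nat → List String)
    (step : PySem.Dict Int (List String) × List String → Int →
      PySem.Dict Int (List String) × List String)
    (m : Int)
    (hstep : ∀ (ps : List (Int × List String)) (j : Nat),
      (∀ p ∈ ps, p.1 < (j : Int) + 4) →
      step (PySem.Dict.mk ps, w (j + 1)) ((j : Int) + 2)
        = (PySem.Dict.mk (ps ++ [((j : Int) + 2 + 2, w (j + 2))]), w (j + 2))) :
    ∀ (fuel j : Nat), (m + 1 - ((j : Int) + 2)).toNat ≤ fuel →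
    ∀ (ps : List (Int × List String)), (∀ p ∈ ps, p.1 < (j : Int) + 4) →
    ((PySem.List.pyRange ((j : Int) + 2) (m + 1) 1).foldl step
        (PySem.Dict.mk ps, w (j + 1))).1
      = PySem.Dict.mk (ps ++ (PySem.List.pyRange ((j : Int) + 2) (m + 1) 1).map
          (fun L => (L + 2, w L.toNat))) := by
  intro fuel
  induction fuel with
  | zero =>
    intro j hf ps _
    have hb : m + 1 ≤ (j : Int) + 2 := by omega
    rw [PySem.List.pyRange_one_eq_nil hb]
    simp
  | succ fuel ih =>
    intro j hf ps hk
    by_cases h : (j : Int) + 2 < m + 1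
    · rw [PySem.List.pyRange_one_cons h, List.foldl_cons, List.map_cons, hstep ps j hk]
      have hcast : (j : Int) + 2 + 1 = ((j + 1 : Nat) : Int) + 2 := by push_cast; ring
      have hw : w (j + 2) = w ((j + 1) + 1) := by ring_nf
      rw [hcast, hw]
      rw [ih (j + 1) (by omega) (ps ++ [((j : Int) + 2 + 2, w ((j + 1) + 1))])
        (by
          intro p hp
          rcases List.mem_append.mp hp with hp | hp
          · have := hk p hp; push_cast; omega
          · simp at hp; subst hp; simp; omega)]
      have ht : ((j : Int) + 2).toNat = j + 2 := by omega
      simp [List.append_assoc, ht]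
    · have hb : m + 1 ≤ (j : Int) + 2 := by omega
      rw [PySem.List.pyRange_one_eq_nil hb]
      simp

-- ---- characterizations of the two ports ----

lemma pvA_char (text : String) (m : Int) :
    fractal_decompose text m
      = pvBase text ++ (PySem.List.pyRange 2 (m + 1) 1).map
          (fun L => (L + 2, pvWin (pvToks text) L.toNat)) := by
  simp only [fractal_decompose]
  rw [pvFilter_split₀]
  set t := PySem.Str.lower (PySem.Str.strip text) with ht
  set toks := PySem.Str.split₀ t with htoks
  set B1 : List String := (t.toList.filter (fun c => !PySem.Chars.isspace c)).map
    (fun c => String.ofList [c]) with hB1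
  set B2 : List String := toks.flatMap (fun tok =>
    (tok.toList.zip tok.toList.tail).map (fun p => String.ofList [p.1, p.2])) with hB2
  -- level 1
  have e1 : (PySem.Dict.empty : PySem.Dict Int (List String)).setdefault 1 []
      = PySem.Dict.mk [((1 : Int), ([] : List String))] := rfl
  have e2 : t.toList.foldl (fun d ch =>
        if PySem.Str.strip (String.ofList [ch]) != "" then
          PySem.Dict.modify d 1 [] (fun ys => ys ++ [String.ofList [ch]]) else d)
        (PySem.Dict.mk [((1 : Int), ([] : List String))])
      = PySem.Dict.mk [((1 : Int), B1)] := by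
    rw [PySem.List.foldl_if_eq_foldl_filter]
    have hch := pvFoldl_chunk_snoc
      (t.toList.filter (fun ch => PySem.Str.strip (String.ofList [ch]) != ""))
      (fun ch => [String.ofList [ch]]) 1 []
      (fun d ch => PySem.Dict.modify d 1 [] (fun ys => ys ++ [String.ofList [ch]]))
      (fun v x _ => pvModify_snoc v _ (by simp)) []
    simp only [List.nil_append] at hch
    rw [hch, hB1]
    have hfc : t.toList.filter (fun ch => PySem.Str.strip (String.ofList [ch]) != "")
        = t.toList.filter (fun c => !PySem.Chars.isspace c) :=
      List.filter_congr (fun c _ => pvStripChar c)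
    simp only [← List.map_eq_flatMap, hfc]
  -- level 2
  have e3 : (PySem.Dict.mk [((1 : Int), B1)]).setdefault 2 []
      = PySem.Dict.mk [((1 : Int), B1), ((2 : Int), ([] : List String))] := by
    have := pvSetdefault_snoc (ps := [((1 : Int), B1)]) (k := 2) [] (by simp)
    simp only [List.cons_append, List.nil_append] at this
    exact this
  have e4 : toks.foldl (fun d tok =>
        (PySem.List.pyRange 0 (PySem.Str.len tok - 1) 1).foldl
          (fun d i => PySem.Dict.modify d 2 []
            (fun ys => ys ++ [PySem.Str.slice tok (some i) (some (i + 2))])) d)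
        (PySem.Dict.mk [((1 : Int), B1), ((2 : Int), ([] : List String))])
      = PySem.Dict.mk [((1 : Int), B1), ((2 : Int), B2)] := by
    have hch := pvFoldl_chunk_snoc toks
      (fun tok => (PySem.List.pyRange 0 (PySem.Str.len tok - 1) 1).flatMap
        (fun i => [PySem.Str.slice tok (some i) (some (i + 2))]))
      2 [((1 : Int), B1)]
      (fun d tok =>
        (PySem.List.pyRange 0 (PySem.Str.len tok - 1) 1).foldl
          (fun d i => PySem.Dict.modify d 2 []
            (fun ys => ys ++ [PySem.Str.slice tok (some i) (some (i + 2))])) d)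
      (fun v tok _ => by
        have := pvFoldl_chunk_snoc
          (PySem.List.pyRange 0 (PySem.Str.len tok - 1) 1)
          (fun i => [PySem.Str.slice tok (some i) (some (i + 2))])
          2 [((1 : Int), B1)]
          (fun d i => PySem.Dict.modify d 2 []
            (fun ys => ys ++ [PySem.Str.slice tok (some i) (some (i + 2))]))
          (fun w i _ => pvModify_snoc w _ (by simp)) v
        exact this) []
    simp only [List.cons_append, List.nil_append] at hch
    rw [hch]
    have hval : toks.flatMap (fun tok =>
        (PySem.List.pyRange 0 (PySem.Str.len tok - 1) 1).flatMap
          (fun i => [PySem.Str.slice tok (some i) (some (i + 2))])) = B2 := by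
      rw [hB2]
      apply List.flatMap_congr
      intro tok _
      rw [← List.map_eq_flatMap, pvBigrams tok]
    rw [hval]
  -- level 3
  have e5 : (PySem.Dict.mk [((1 : Int), B1), ((2 : Int), B2)]).setdefault 3 []
      = PySem.Dict.mk [((1 : Int), B1), ((2 : Int), B2), ((3 : Int), ([] : List String))] := by
    have := pvSetdefault_snoc (ps := [((1 : Int), B1), ((2 : Int), B2)]) (k := 3) [] (by simp)
    simp only [List.cons_append, List.nil_append] at this
    exact this
  have e6 : (PySem.Dict.mk [((1 : Int), B1), ((2 : Int), B2),
        ((3 : Int), ([] : List String))]).modify 3 [] (fun ys => ys ++ toks)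
      = PySem.Dict.mk [((1 : Int), B1), ((2 : Int), B2), ((3 : Int), toks)] := by
    have := pvModify_snoc (ps := [((1 : Int), B1), ((2 : Int), B2)]) (k := 3) []
      (fun ys => ys ++ toks) (by simp)
    simp only [List.cons_append, List.nil_append] at this
    exact this
  -- phrase levels
  have hstep : ∀ (ps : List (Int × List String)) (L : Int), 2 ≤ L →
      (∀ p ∈ ps, p.1 < L + 2) →
      (fun d L =>
        let lvl := 3 + L - 1
        let d := PySem.Dict.setdefault d lvl []
        (PySem.List.pyRange 0 ((toks.length : Int) - L + 1) 1).foldl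
          (fun d i => PySem.Dict.modify d lvl []
            (fun ys => ys ++ [PySem.Str.join " "
              (PySem.List.slice toks (some i) (some (i + L)))])) d)
        (PySem.Dict.mk ps) L
      = PySem.Dict.mk (ps ++ [(L + 2, pvWin toks L.toNat)]) := by
    intro ps L hL hk
    dsimp only
    have hlvl : 3 + L - 1 = L + 2 := by ring
    rw [hlvl]
    have hfresh : ∀ p ∈ ps, p.1 ≠ L + 2 := fun p hp => by have := hk p hp; omega
    rw [pvSetdefault_snoc [] hfresh]
    rw [pvFoldl_chunk_snoc
      (PySem.List.pyRange 0 ((toks.length : Int) - L + 1) 1)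
      (fun i => [PySem.Str.join " " (PySem.List.slice toks (some i) (some (i + L)))])
      (L + 2) ps
      (fun d i => PySem.Dict.modify d (L + 2) []
        (fun ys => ys ++ [PySem.Str.join " " (PySem.List.slice toks (some i) (some (i + L)))]))
      (fun v i _ => pvModify_snoc v _ hfresh) []]
    have hval : ([] : List String) ++ (PySem.List.pyRange 0 ((toks.length : Int) - L + 1) 1).flatMap
        (fun i => [PySem.Str.join " " (PySem.List.slice toks (some i) (some (i + L)))])
        = pvWin toks L.toNat := by
      rw [List.nil_append, ← List.map_eq_flatMap]
      exact pvWinList_eq toks L (by omega)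
    rw [hval]
  have hmain := pvPhraseFoldA (fun L => pvWin toks L.toNat)
    (fun d L =>
      let lvl := 3 + L - 1
      let d := PySem.Dict.setdefault d lvl []
      (PySem.List.pyRange 0 ((toks.length : Int) - L + 1) 1).foldl
        (fun d i => PySem.Dict.modify d lvl []
          (fun ys => ys ++ [PySem.Str.join " "
            (PySem.List.slice toks (some i) (some (i + L)))])) d)
    m hstep (m + 1 - 2).toNat 0 (by simp)
    [((1 : Int), B1), ((2 : Int), B2), ((3 : Int), toks)]
    (by intro p hp; simp at hp; rcases hp with hp | hp | hp <;> (subst hp; norm_num))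
  simp only [Nat.cast_zero, zero_add] at hmain
  rw [e1, e2, e3, e4, e5, e6, hmain]
  simp [pvBase, pvT, pvToks, hB1, hB2, htoks, ht, PySem.Str.toList_lower, PySem.Str.toList_strip]

lemma pvB_char (text : String) (m : Int) :
    fractal_decompose_alt text m
      = pvBase text ++ (PySem.List.pyRange 2 (m + 1) 1).map
          (fun L => (L + 2, pvWin (pvToks text) L.toNat)) := by
  simp only [fractal_decompose_alt]
  set toks := PySem.Str.split₀ (PySem.Str.lower (PySem.Str.strip text)) with htoks
  have hstep : ∀ (ps : List (Int × List String)) (j : Nat),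
      (∀ p ∈ ps, p.1 < (j : Int) + 4) →
      (fun (s : PySem.Dict Int (List String) × List String) L =>
        let prev := (s.2.zip (PySem.List.slice toks (some (L - 1)) none)).map
          (fun p => p.1 ++ " " ++ p.2)
        (s.1.insert (L + 2) prev, prev))
        (PySem.Dict.mk ps, pvWin toks (j + 1)) ((j : Int) + 2)
      = (PySem.Dict.mk (ps ++ [((j : Int) + 2 + 2, pvWin toks (j + 2))]), pvWin toks (j + 2)) := by
    intro ps j hk
    dsimp only
    have h1 : ((j : Int) + 2) - 1 = ((j + 1 : Nat) : Int) := by push_cast; ring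
    rw [h1, PySem.List.slice_from_natCast, pvWin_succ toks (j + 1) (by omega)]
    have h2 : j + 1 + 1 = j + 2 := by omega
    rw [h2, pvInsert_fresh _ (by intro p hp; have := hk p hp; omega)]
  have hmain := pvPhraseFoldB (pvWin toks)
    (fun (s : PySem.Dict Int (List String) × List String) L =>
      let prev := (s.2.zip (PySem.List.slice toks (some (L - 1)) none)).map
        (fun p => p.1 ++ " " ++ p.2)
      (s.1.insert (L + 2) prev, prev))
    m hstep (m + 1 - 2).toNat 0 (by simp)
    [(1, ((PySem.Str.lower (PySem.Str.strip text)).toList.filter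
            (fun c => !PySem.Chars.isspace c)).map (fun c => String.ofList [c])),
     (2, toks.flatMap (fun tok =>
           (tok.toList.zip tok.toList.tail).map (fun p => String.ofList [p.1, p.2]))),
     (3, toks)]
    (by intro p hp; simp at hp; rcases hp with hp | hp | hp <;> (subst hp; norm_num))
  simp only [Nat.cast_zero, zero_add, pvWin_one] at hmain
  rw [hmain]
  simp [pvBase, pvT, pvToks, htoks]

-- ===== VERDICT (by name: the statement is the Claim_ definition above) =====
theorem fractal_decompose_spec : Claim_equal_fractal_decompose := by
  intro text m _
  unfold Spec_fractal_decompose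
  rw [pvA_char, pvB_char]
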